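-- pv_equiv track=rewrite | github.com/hello0U0/codingtest | PROGRAMMERS/부대복귀.py | solution
-- ===== SOURCE A (Python) =====
-- from collections import deque
--
-- def solution(n, roads, sources, destination):
--     g = [[] for _ in range(n+1)]
--     for road in roads:
--         g[road[0]].append(road[1])
--         g[road[1]].append(road[0])
--     destDist = [-1] * (n+1)
--     q = deque()
--
--     q.append((destination,0))
--     while(q):
--         now, dist = q.popleft()
--         if destDist[now] != -1:
--             continue
--         destDist[now] = dist
--         for next in g[now]:
--             q.append((next, dist+1))
--
--     answer = [destDist[s] for s in sources]
--     return answer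
-- ===== SOURCE B (Python) =====
-- def solution(n, roads, sources, destination):
--     dist = [-1] * (n + 1)
--     dist[destination] = 0
--     k = 0
--     while True:
--         changed = False
--         for a, b in roads:
--             if dist[a] == k and dist[b] == -1:
--                 dist[b] = k + 1
--                 changed = True
--             if dist[b] == k and dist[a] == -1:
--                 dist[a] = k + 1
--                 changed = True
--         if not changed:
--             break
--         k += 1
--     return [dist[s] for s in sources]
-- ===== Notes on version B (the rewrite author's own statement) =====
-- stated objective: alternative
-- what changed: Replaced A's adjacency-list BFS with an explicit deque by Bellman-Ford-style edge relaxation: B builds no adjacency list and no queue at all, it just rescans the raw road list, round k extending the distance-k labels to unlabelled neighbours, until a scan changes nothing.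
import Mathlib
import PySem

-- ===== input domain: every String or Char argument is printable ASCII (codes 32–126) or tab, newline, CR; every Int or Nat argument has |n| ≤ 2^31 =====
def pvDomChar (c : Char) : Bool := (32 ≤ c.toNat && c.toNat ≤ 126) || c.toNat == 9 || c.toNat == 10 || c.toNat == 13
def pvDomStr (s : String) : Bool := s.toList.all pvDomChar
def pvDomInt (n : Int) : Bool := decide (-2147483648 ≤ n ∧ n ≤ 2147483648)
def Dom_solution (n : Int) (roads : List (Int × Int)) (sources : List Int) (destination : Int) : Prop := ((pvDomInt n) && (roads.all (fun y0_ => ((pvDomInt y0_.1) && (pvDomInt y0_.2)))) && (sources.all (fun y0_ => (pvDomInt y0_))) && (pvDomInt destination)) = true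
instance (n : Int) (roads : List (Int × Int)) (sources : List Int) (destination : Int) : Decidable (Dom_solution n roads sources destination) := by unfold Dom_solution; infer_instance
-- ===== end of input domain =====

-- B replaces A's adjacency-list BFS with a queue by Bellman-Ford-style edge relaxation: no
-- adjacency list and no queue at all, just repeated scans of the raw road list, round k extending
-- the distance-k labels to unlabelled neighbours, until a scan changes nothing (alternative
-- algorithm, not faster).

-- ===== PORT A =====
-- termination helper, cited by bfsA's decreasing_by: marking a '-1' cell lowers the count of -1s
lemma pv_count_pySetD_succ (d : List Int) (i v : Int) (hv : v ≠ -1)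
    (h : PySem.List.pyGetD d i 0 = -1) :
    (PySem.List.pySetD d i v).count (-1) + 1 = d.count (-1) := by
  rcases hk : PySem.List.pyIdx? d.length i with _ | k
  · exfalso
    simp [PySem.List.pyGetD, PySem.List.pyGet?, hk] at h
  · have h' : d[k]?.getD 0 = -1 := by
      simpa [PySem.List.pyGetD, PySem.List.pyGet?, hk] using h
    rcases hg : d[k]? with _ | x
    · simp [hg] at h'
    · obtain ⟨hlt, hx⟩ := List.getElem?_eq_some_iff.mp hg
      have hxv : d[k] = -1 := by simp [hg, hx] at h' ⊢; omega
      have hset : PySem.List.pySetD d i v = d.set k v := by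
        simp [PySem.List.pySetD, PySem.List.pySet?, hk]
      have hpos : 0 < d.count (-1) := by
        rw [List.count_pos_iff]
        exact hxv ▸ List.getElem_mem hlt
      rw [hset, List.count_set hlt, hxv]
      simp [hv]
      omega

lemma pv_count_pySetD_lt (d : List Int) (i v : Int) (hv : v ≠ -1)
    (h : PySem.List.pyGetD d i 0 = -1) :
    (PySem.List.pySetD d i v).count (-1) < d.count (-1) := by
  have := pv_count_pySetD_succ d i v hv h; omega

-- the while-loop of A: a deque of (node, dist) pairs, visited check on pop
def bfsA (g : List (List Int)) (d : List Int) (q : List (Int × Nat)) : List Int :=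
  match q with
  | [] => d
  | (now, dist) :: rest =>
    if PySem.List.pyGetD d now 0 ≠ -1 then
      bfsA g d rest
    else
      bfsA g (PySem.List.pySetD d now (dist : Int))
        (rest ++ (PySem.List.pyGetD g now []).map (fun nx => (nx, dist + 1)))
termination_by (d.count (-1), q.length)
decreasing_by
  · apply Prod.Lex.right; simp
  · apply Prod.Lex.left
    exact pv_count_pySetD_lt d now (dist : Int) (by omega) (by omega)

def solution (n : Int) (roads : List (Int × Int)) (sources : List Int) (destination : Int) : List Int :=
  let g := roads.foldl (fun g road =>
      let g1 := PySem.List.pySetD g road.1 (PySem.List.pyGetD g road.1 [] ++ [road.2])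
      PySem.List.pySetD g1 road.2 (PySem.List.pyGetD g1 road.2 [] ++ [road.1]))
    (List.replicate (n + 1).toNat ([] : List Int))
  let destDist := List.replicate (n + 1).toNat (-1 : Int)
  let res := bfsA g destDist [(destination, (0 : Nat))]
  sources.map (fun s => PySem.List.pyGetD res s 0)

-- ===== PORT B =====
-- one scan of the raw road list (the inner for-loop of B): relax both directions of every road,
-- recording in the flag whether anything changed
def pvRoundF (roads : List (Int × Int)) (k : Int) (d : List Int) : List Int × Bool :=
  roads.foldl (fun st r =>
    let st1 := if PySem.List.pyGetD st.1 r.1 0 = k ∧ PySem.List.pyGetD st.1 r.2 0 = -1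
               then (PySem.List.pySetD st.1 r.2 (k + 1), true) else st
    if PySem.List.pyGetD st1.1 r.2 0 = k ∧ PySem.List.pyGetD st1.1 r.1 0 = -1
    then (PySem.List.pySetD st1.1 r.1 (k + 1), true) else st1) (d, false)

-- termination helper, cited by bfB's decreasing_by: a scan that set its flag marked a '-1' cell
lemma pv_foldF_count (k : Int) (hk : 0 ≤ k) :
    ∀ (rs : List (Int × Int)) (st : List Int × Bool),
      (rs.foldl (fun st r =>
        let st1 := if PySem.List.pyGetD st.1 r.1 0 = k ∧ PySem.List.pyGetD st.1 r.2 0 = -1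
                   then (PySem.List.pySetD st.1 r.2 (k + 1), true) else st
        if PySem.List.pyGetD st1.1 r.2 0 = k ∧ PySem.List.pyGetD st1.1 r.1 0 = -1
        then (PySem.List.pySetD st1.1 r.1 (k + 1), true) else st1) st).1.count (-1)
      + (if (rs.foldl (fun st r =>
        let st1 := if PySem.List.pyGetD st.1 r.1 0 = k ∧ PySem.List.pyGetD st.1 r.2 0 = -1
                   then (PySem.List.pySetD st.1 r.2 (k + 1), true) else st
        if PySem.List.pyGetD st1.1 r.2 0 = k ∧ PySem.List.pyGetD st1.1 r.1 0 = -1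
        then (PySem.List.pySetD st1.1 r.1 (k + 1), true) else st1) st).2 then 1 else 0)
      ≤ st.1.count (-1) + (if st.2 then 1 else 0) := by
  intro rs
  induction rs with
  | nil => intro st; exact le_rfl
  | cons r rs ih =>
    intro st
    rw [List.foldl_cons]
    refine le_trans (ih _) ?_
    by_cases h1 : PySem.List.pyGetD st.1 r.1 0 = k ∧ PySem.List.pyGetD st.1 r.2 0 = -1
    · simp only [if_pos h1]
      have hc1 := pv_count_pySetD_succ st.1 r.2 (k + 1) (by omega) h1.2
      by_cases h2 : PySem.List.pyGetD (PySem.List.pySetD st.1 r.2 (k + 1)) r.2 0 = k ∧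
          PySem.List.pyGetD (PySem.List.pySetD st.1 r.2 (k + 1)) r.1 0 = -1
      · simp only [if_pos h2]
        have hc2 := pv_count_pySetD_succ (PySem.List.pySetD st.1 r.2 (k + 1)) r.1 (k + 1)
          (by omega) h2.2
        split_ifs <;> omega
      · simp only [if_neg h2]
        split_ifs <;> omega
    · simp only [if_neg h1]
      by_cases h2 : PySem.List.pyGetD st.1 r.2 0 = k ∧ PySem.List.pyGetD st.1 r.1 0 = -1
      · simp only [if_pos h2]
        have hc2 := pv_count_pySetD_succ st.1 r.1 (k + 1) (by omega) h2.2
        split_ifs <;> omega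
      · simp only [if_neg h2]
        exact le_rfl

lemma pv_roundF_lt (roads : List (Int × Int)) (k : Nat) (d : List Int)
    (h : (pvRoundF roads (k : Int) d).2 = true) :
    (pvRoundF roads (k : Int) d).1.count (-1) < d.count (-1) := by
  have hts := pv_foldF_count (k : Int) (by omega) roads (d, false)
  unfold pvRoundF at h ⊢
  rw [h] at hts
  simp at hts
  omega

-- the while-loop of B: scan rounds until one changes nothing
def bfB (roads : List (Int × Int)) (d : List Int) (k : Nat) : List Int :=
  let st := pvRoundF roads (k : Int) d
  if h : st.2 then bfB roads st.1 (k + 1) else st.1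
termination_by d.count (-1)
decreasing_by exact pv_roundF_lt roads k d h

def solution_alt (n : Int) (roads : List (Int × Int)) (sources : List Int) (destination : Int) : List Int :=
  let dist := PySem.List.pySetD (List.replicate (n + 1).toNat (-1 : Int)) destination 0
  let res := bfB roads dist 0
  sources.map (fun s => PySem.List.pyGetD res s 0)

-- ===== PRECONDITION & SPEC =====
-- Pre_solution is exactly the set of inputs on which the Python A returns normally: node indices of
-- destination, road endpoints and sources must be valid Python indices into the length-(n+1) arrays
-- (Python's negative-index wraparound is INCLUDED: both programs accept and agree on such inputs);
-- outside it A raises IndexError.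
def Pre_solution (n : Int) (roads : List (Int × Int)) (sources : List Int) (destination : Int) : Prop :=
  PySem.Raise.InRange (n + 1).toNat destination ∧
  (∀ r ∈ roads, PySem.Raise.InRange (n + 1).toNat r.1 ∧ PySem.Raise.InRange (n + 1).toNat r.2) ∧
  (∀ s ∈ sources, PySem.Raise.InRange (n + 1).toNat s)

instance (n : Int) (roads : List (Int × Int)) (sources : List Int) (destination : Int) : Decidable (Pre_solution n roads sources destination) := by unfold Pre_solution; infer_instance

def pvWitness_solution : Int × (List (Int × Int)) × List Int × Int := (3, [(1, 2), (2, 3), (3, 0)], [1, 0, 2], 2)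

def Spec_solution (n : Int) (roads : List (Int × Int)) (sources : List Int) (destination : Int) (out : List Int) : Prop := out = solution_alt n roads sources destination
instance (n : Int) (roads : List (Int × Int)) (sources : List Int) (destination : Int) (out : List Int) : Decidable (Spec_solution n roads sources destination out) := by unfold Spec_solution; infer_instance

-- ===== CLAIM (what is proved, stated in full; the proofs are below) =====
def Claim_equal_solution : Prop := ∀ (n : Int) (roads : List (Int × Int)) (sources : List Int) (destination : Int), Dom_solution n roads sources destination → Pre_solution n roads sources destination → Spec_solution n roads sources destination (solution n roads sources destination)

-- ===== LEMMAS AND PROOFS =====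
-- Proof plan: (I) A's deque BFS equals a level-order BFS bfsLevel (lemmas procB/pv_L1/pv_SL/pv_L2);
-- (II) each bfsLevel level and each of B's relaxation rounds are the SAME pointwise marking of the
-- distance array ('unlabelled cell adjacent to a level-k cell gets k+1'), proved by describing both
-- folds pointwise (pv_round_desc, pv_expC_desc) and matching the two adjacency conditions through
-- the adjacency-list characterisation pv_build; (III) once BFS stops, the remaining rounds are
-- no-ops (pv_rounds_noop); pv_sim glues the levels to the rounds by induction.

-- generic helpers about Python index resolution
lemma pv_idx_lt {L : Nat} {i : Int} {c : Nat} (h : PySem.List.pyIdx? L i = some c) : c < L := by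
  unfold PySem.List.pyIdx? at h
  split_ifs at h with h1 h2 h3 <;> simp_all <;> omega

lemma pv_idx_of_inRange {L : Nat} {i : Int} (h : PySem.Raise.InRange L i) :
    ∃ c, PySem.List.pyIdx? L i = some c := by
  obtain ⟨h1, h2⟩ := h
  unfold PySem.List.pyIdx?
  split_ifs <;> simp_all

lemma pv_getD_cell {α : Type} (xs : List α) (i : Int) (c : Nat) (dflt : α)
    (h : PySem.List.pyIdx? xs.length i = some c) :
    PySem.List.pyGetD xs i dflt = xs.getD c dflt := by
  simp [PySem.List.pyGetD, PySem.List.pyGet?, h, List.getD]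

lemma pv_setD_cell {α : Type} (xs : List α) (i : Int) (c : Nat) (v : α)
    (h : PySem.List.pyIdx? xs.length i = some c) :
    PySem.List.pySetD xs i v = xs.set c v := by
  simp [PySem.List.pySetD, PySem.List.pySet?, h]

lemma pv_getD_set {α : Type} (xs : List α) (c c' : Nat) (v : α) (dflt : α) (hc : c < xs.length) :
    (xs.set c v).getD c' dflt = if c' = c then v else xs.getD c' dflt := by
  rcases eq_or_ne c' c with h | h
  · subst h; simp [List.getD, hc]
  · simp [List.getD, Ne.symm h, h]

lemma pv_ext_getD (xs ys : List Int) (hl : xs.length = ys.length)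
    (h : ∀ c, xs.getD c 0 = ys.getD c 0) : xs = ys := by
  apply List.ext_getElem hl
  intro i h1 h2
  have h3 := h i
  rw [List.getD, List.getD, List.getElem?_eq_getElem h1, List.getElem?_eq_getElem h2] at h3
  simpa using h3

lemma pv_getD_mem (xs : List Int) (c : Nat) (h : c < xs.length) : xs.getD c 0 ∈ xs := by
  rw [List.getD, List.getElem?_eq_getElem h]
  exact List.getElem_mem h

-- ===== (I) A's deque BFS = level-order BFS =====
lemma pv_expand_count (val : Int) (hval : val ≠ -1) :
    ∀ (cands : List Int) (st : List Int × List Int),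
      ((cands.foldl (fun st v => if PySem.List.pyGetD st.1 v 0 = -1 then
          (PySem.List.pySetD st.1 v val, st.2 ++ [v]) else st) st).1.count (-1)) +
      ((cands.foldl (fun st v => if PySem.List.pyGetD st.1 v 0 = -1 then
          (PySem.List.pySetD st.1 v val, st.2 ++ [v]) else st) st).2.length)
      = st.1.count (-1) + st.2.length := by
  intro cands
  induction cands with
  | nil => intro st; simp
  | cons c cs ih =>
    intro st
    simp only [List.foldl_cons]
    by_cases hc : PySem.List.pyGetD st.1 c 0 = -1
    · rw [if_pos hc]
      have := ih (PySem.List.pySetD st.1 c val, st.2 ++ [c])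
      have hc2 := pv_count_pySetD_succ st.1 c val hval hc
      simp at this ⊢
      omega
    · rw [if_neg hc]; exact ih st

lemma pv_expandNest_count (g : List (List Int)) (val : Int) (hval : val ≠ -1) :
    ∀ (frontier : List Int) (st : List Int × List Int),
      ((frontier.foldl (fun st u => (PySem.List.pyGetD g u []).foldl
          (fun st v => if PySem.List.pyGetD st.1 v 0 = -1 then
            (PySem.List.pySetD st.1 v val, st.2 ++ [v]) else st) st) st).1.count (-1)) +
      ((frontier.foldl (fun st u => (PySem.List.pyGetD g u []).foldl
          (fun st v => if PySem.List.pyGetD st.1 v 0 = -1 then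
            (PySem.List.pySetD st.1 v val, st.2 ++ [v]) else st) st) st).2.length)
      = st.1.count (-1) + st.2.length := by
  intro frontier
  induction frontier with
  | nil => intro st; simp
  | cons u fr ih =>
    intro st
    simp only [List.foldl_cons]
    rw [ih]
    exact pv_expand_count val hval _ st

-- level-order BFS: the intermediate between A's deque and B's rounds
def bfsLevel (g : List (List Int)) (d : List Int) (frontier : List Int) (dist : Nat) : List Int :=
  match frontier with
  | [] => d
  | u0 :: fr =>
    let st := (u0 :: fr).foldl
      (fun st u => (PySem.List.pyGetD g u []).foldl
        (fun st v =>
          if PySem.List.pyGetD st.1 v 0 = -1 then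
            (PySem.List.pySetD st.1 v ((dist + 1 : Nat) : Int), st.2 ++ [v])
          else st) st)
      (d, ([] : List Int))
    bfsLevel g st.1 st.2 (dist + 1)
termination_by (d.count (-1), frontier.length)
decreasing_by
  simp only [dite_eq_ite]
  have hinv := pv_expandNest_count g ((dist + 1 : Nat) : Int) (by omega) (u0 :: fr) (d, ([] : List Int))
  rw [Prod.lex_iff]
  simp at hinv ⊢
  omega

def procB (g : List (List Int)) (d : List Int) (pending acc : List Int) (dist : Nat) : List Int :=
  match pending with
  | p :: ps =>
    if PySem.List.pyGetD d p 0 ≠ -1 then procB g d ps acc dist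
    else procB g (PySem.List.pySetD d p (dist : Int)) ps (acc ++ PySem.List.pyGetD g p []) dist
  | [] =>
    match acc with
    | [] => d
    | a :: as => procB g d (a :: as) [] (dist + 1)
termination_by (d.count (-1), pending.length + acc.length, acc.length)
decreasing_by
  · apply Prod.Lex.right
    rw [Prod.lex_iff]; simp
  · apply Prod.Lex.left
    exact pv_count_pySetD_lt d p (dist : Int) (by omega) (by omega)
  · apply Prod.Lex.right
    rw [Prod.lex_iff]; simp

lemma pv_L1 (g : List (List Int)) :
    ∀ (d : List Int) (pending acc : List Int) (dist : Nat),
      bfsA g d (pending.map (fun p => (p, dist)) ++ acc.map (fun a => (a, dist + 1)))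
        = procB g d pending acc dist := by
  intro d pending acc dist
  fun_induction procB g d pending acc dist with
  | case1 d acc dist p ps h ih =>
    rw [List.map_cons, List.cons_append, bfsA, if_pos h]
    exact ih
  | case2 d acc dist p ps h ih =>
    rw [List.map_cons, List.cons_append, bfsA, if_neg h]
    rw [List.map_append, ← List.append_assoc] at ih
    exact ih
  | case3 d dist =>
    simp only [List.map_nil, List.nil_append]
    rw [bfsA]
  | case4 d dist a as ih =>
    simp only [List.map_nil, List.nil_append]
    simpa using ih

def expC (d cands : List Int) (val : Int) : List Int × List Int :=
  cands.foldl (fun st v => if PySem.List.pyGetD st.1 v 0 = -1 then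
    (PySem.List.pySetD st.1 v val, st.2 ++ [v]) else st) (d, [])

lemma pv_foldl_acc (val : Int) :
    ∀ (cands : List Int) (d0 : List Int) (l0 : List Int),
      cands.foldl (fun st v => if PySem.List.pyGetD st.1 v 0 = -1 then
          (PySem.List.pySetD st.1 v val, st.2 ++ [v]) else st) (d0, l0)
        = ((expC d0 cands val).1, l0 ++ (expC d0 cands val).2) := by
  intro cands
  induction cands with
  | nil => intro d0 l0; simp [expC]
  | cons c cs ih =>
    intro d0 l0
    simp only [expC, List.foldl_cons, List.nil_append]
    by_cases hc : PySem.List.pyGetD d0 c 0 = -1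
    · simp only [if_pos hc]
      simp only [ih]
      simp
    · simp only [if_neg hc]
      simp only [ih]
      simp

lemma pv_expC_cons (d : List Int) (c : Int) (cs : List Int) (val : Int) :
    expC d (c :: cs) val =
      if PySem.List.pyGetD d c 0 = -1 then
        ((expC (PySem.List.pySetD d c val) cs val).1,
          c :: (expC (PySem.List.pySetD d c val) cs val).2)
      else expC d cs val := by
  by_cases hc : PySem.List.pyGetD d c 0 = -1
  · rw [if_pos hc]
    show List.foldl _ _ (c :: cs) = _
    rw [List.foldl_cons]
    simp only [if_pos hc]
    rw [pv_foldl_acc]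
    rfl
  · rw [if_neg hc]
    show List.foldl _ _ (c :: cs) = _
    rw [List.foldl_cons]
    simp only [if_neg hc]
    rfl

lemma pv_SL (g : List (List Int)) (dist : Nat) :
    ∀ (cands : List Int) (d acc : List Int),
      procB g d cands acc dist
        = procB g (expC d cands (dist : Int)).1 []
            (acc ++ (expC d cands (dist : Int)).2.flatMap (fun u => PySem.List.pyGetD g u [])) dist := by
  intro cands
  induction cands with
  | nil => intro d acc; simp [expC]
  | cons c cs ih =>
    intro d acc
    rw [procB.eq_1, pv_expC_cons]
    by_cases hc : PySem.List.pyGetD d c 0 = -1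
    · rw [if_neg (by simpa using hc), if_pos hc, ih]
      simp [List.append_assoc]
    · rw [if_pos hc, if_neg hc, ih]

lemma pv_neg_one_mem (d : List Int) (i : Int) (h : PySem.List.pyGetD d i 0 = -1) :
    (-1 : Int) ∈ d := by
  rcases hk : PySem.List.pyIdx? d.length i with _ | k
  · exfalso; simp [PySem.List.pyGetD, PySem.List.pyGet?, hk] at h
  · have h' : d[k]?.getD 0 = -1 := by
      simpa [PySem.List.pyGetD, PySem.List.pyGet?, hk] using h
    rcases hg : d[k]? with _ | x
    · simp [hg] at h'
    · obtain ⟨hlt, hx⟩ := List.getElem?_eq_some_iff.mp hg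
      have : d[k] = -1 := by simp [hg, hx] at h' ⊢; omega
      exact this ▸ List.getElem_mem hlt

lemma pv_expC_frozen (d : List Int) (h : d.count (-1) = 0) :
    ∀ (cands : List Int) (val : Int), expC d cands val = (d, []) := by
  intro cands val
  induction cands with
  | nil => rfl
  | cons c cs ih =>
    rw [pv_expC_cons]
    rw [if_neg, ih]
    intro hc
    have := pv_neg_one_mem d c hc
    rw [← List.count_pos_iff] at this
    omega

lemma pv_nest_eq_expC (g : List (List Int)) (val : Int) (frontier d : List Int) :
    frontier.foldl (fun st u => (PySem.List.pyGetD g u []).foldl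
        (fun st v => if PySem.List.pyGetD st.1 v 0 = -1 then
          (PySem.List.pySetD st.1 v val, st.2 ++ [v]) else st) st) (d, ([] : List Int))
      = expC d (frontier.flatMap (fun u => PySem.List.pyGetD g u [])) val := by
  unfold expC
  rw [List.foldl_flatMap]

lemma pv_expC_count (d cands : List Int) (val : Int) (hval : val ≠ -1) :
    (expC d cands val).1.count (-1) + (expC d cands val).2.length = d.count (-1) := by
  have h := pv_expand_count val hval cands (d, ([] : List Int))
  simpa [expC] using h

lemma pv_L2 (g : List (List Int)) :
    ∀ (m : Nat) (d cands : List Int) (dist : Nat), d.count (-1) ≤ m →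
      procB g d cands [] dist
        = bfsLevel g (expC d cands (dist : Int)).1 (expC d cands (dist : Int)).2 dist := by
  intro m
  induction m with
  | zero =>
    intro d cands dist hm
    have h0 : d.count (-1) = 0 := by omega
    rw [pv_SL, pv_expC_frozen d h0]
    simp only [List.flatMap_nil, List.nil_append]
    rw [procB.eq_2, bfsLevel.eq_1]
  | succ m ih =>
    intro d cands dist hm
    rw [pv_SL]
    simp only [List.nil_append]
    rcases hflat : (expC d cands (dist : Int)).2.flatMap (fun u => PySem.List.pyGetD g u []) with _ | ⟨x, xs⟩
    · rw [procB.eq_2]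
      rcases hE2 : (expC d cands (dist : Int)).2 with _ | ⟨u, fr⟩
      · rw [bfsLevel.eq_1]
      · rw [bfsLevel.eq_2, pv_nest_eq_expC]
        have hnil : (u :: fr).flatMap (fun u => PySem.List.pyGetD g u []) = [] := hE2 ▸ hflat
        rw [hnil]
        rw [show expC (expC d cands (dist : Int)).1 [] ((dist + 1 : Nat) : Int)
              = ((expC d cands (dist : Int)).1, []) from rfl]
        rw [bfsLevel.eq_1]
    · rw [procB.eq_3]
      have hne : (expC d cands (dist : Int)).2 ≠ [] := by
        intro h
        rw [h] at hflat
        simp at hflat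
      have hcount : (expC d cands (dist : Int)).1.count (-1) ≤ m := by
        have h1 := pv_expC_count d cands (dist : Int) (by omega)
        rcases hE2 : (expC d cands (dist : Int)).2 with _ | ⟨u, fr⟩
        · exact absurd hE2 hne
        · rw [hE2] at h1
          simp at h1
          omega
      rw [ih _ (x :: xs) (dist + 1) hcount]
      rcases hE2 : (expC d cands (dist : Int)).2 with _ | ⟨u, fr⟩
      · exact absurd hE2 hne
      · rw [bfsLevel.eq_2, pv_nest_eq_expC]
        have hxs : (u :: fr).flatMap (fun u => PySem.List.pyGetD g u []) = x :: xs := hE2 ▸ hflat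
        rw [hxs]

lemma pv_init_unvisited (L : Nat) (i : Int) (h : PySem.Raise.InRange L i) :
    PySem.List.pyGetD (List.replicate L (-1 : Int)) i 0 = -1 := by
  have hm := PySem.List.pyGetD_mem (xs := List.replicate L (-1 : Int)) (i := i) (d := 0)
    (by simpa using h)
  exact List.eq_of_mem_replicate hm

def pvAdj1 (N : Nat) (r : Int × Int) (d : List Int) (k : Int) (c : Nat) : Prop :=
  (PySem.List.pyGetD d r.1 0 = k ∧ PySem.List.pyIdx? N r.2 = some c) ∨
  (PySem.List.pyGetD d r.2 0 = k ∧ PySem.List.pyIdx? N r.1 = some c)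

def pvAdjTo (N : Nat) (roads : List (Int × Int)) (d : List Int) (k : Int) (c : Nat) : Prop :=
  ∃ r ∈ roads, pvAdj1 N r d k c

-- the body of pvRoundF's fold, as a named function (definitionally pvRoundF's lambda)
def pvFStep (k : Int) (st : List Int × Bool) (r : Int × Int) : List Int × Bool :=
  let st1 := if PySem.List.pyGetD st.1 r.1 0 = k ∧ PySem.List.pyGetD st.1 r.2 0 = -1
             then (PySem.List.pySetD st.1 r.2 (k + 1), true) else st
  if PySem.List.pyGetD st1.1 r.2 0 = k ∧ PySem.List.pyGetD st1.1 r.1 0 = -1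
  then (PySem.List.pySetD st1.1 r.1 (k + 1), true) else st1

lemma pv_adjTo_cons (N : Nat) (r : Int × Int) (rs : List (Int × Int)) (d : List Int) (k : Int) (c : Nat) :
    pvAdjTo N (r :: rs) d k c ↔ pvAdj1 N r d k c ∨ pvAdjTo N rs d k c := by
  simp [pvAdjTo, List.mem_cons, or_and_right, exists_or]

-- value transfer between two arrays that agree up to freshly written k+1 marks
lemma pv_adjTo_transfer (N : Nat) (rs : List (Int × Int)) (d d' : List Int) (k : Int)
    (hd : d.length = N) (hd' : d'.length = N)
    (hr : ∀ r ∈ rs, PySem.Raise.InRange N r.1 ∧ PySem.Raise.InRange N r.2)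
    (hval : ∀ c, c < N → (d'.getD c 0 = k ↔ d.getD c 0 = k)) (c : Nat) :
    pvAdjTo N rs d' k c ↔ pvAdjTo N rs d k c := by
  unfold pvAdjTo pvAdj1
  apply exists_congr; intro r
  by_cases hm : r ∈ rs
  · obtain ⟨h1, h2⟩ := hr r hm
    obtain ⟨c1, hc1⟩ := pv_idx_of_inRange h1
    obtain ⟨c2, hc2⟩ := pv_idx_of_inRange h2
    rw [pv_getD_cell d r.1 c1 0 (hd ▸ hc1), pv_getD_cell d r.2 c2 0 (hd ▸ hc2),
        pv_getD_cell d' r.1 c1 0 (hd' ▸ hc1), pv_getD_cell d' r.2 c2 0 (hd' ▸ hc2),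
        hval c1 (pv_idx_lt hc1), hval c2 (pv_idx_lt hc2)]
  · simp [hm]

-- the flag only accumulates: a fold from (d, b) is the fold from (d, false) with b or-ed in
lemma pv_fstep_flag (k : Int) (st : List Int × Bool) (r : Int × Int) :
    pvFStep k st r = ((pvFStep k (st.1, false) r).1, st.2 || (pvFStep k (st.1, false) r).2) := by
  unfold pvFStep
  by_cases hA : PySem.List.pyGetD st.1 r.1 0 = k ∧ PySem.List.pyGetD st.1 r.2 0 = -1
  · simp only [if_pos hA]
    split_ifs <;> simp
  · simp only [if_neg hA]
    split_ifs <;> simp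

lemma pv_foldF_flag (k : Int) :
    ∀ (rs : List (Int × Int)) (st : List Int × Bool),
      rs.foldl (pvFStep k) st
        = ((rs.foldl (pvFStep k) (st.1, false)).1, st.2 || (rs.foldl (pvFStep k) (st.1, false)).2) := by
  intro rs
  induction rs with
  | nil => intro st; simp
  | cons r rs ih =>
    intro st
    rw [List.foldl_cons, List.foldl_cons, ih (pvFStep k st r), pv_fstep_flag k st r]
    rw [ih (pvFStep k (st.1, false) r)]
    simp [Bool.or_assoc]

lemma pv_roundF_cons (r : Int × Int) (rs : List (Int × Int)) (k : Int) (d : List Int) :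
    pvRoundF (r :: rs) k d
      = ((pvRoundF rs k (pvFStep k (d, false) r).1).1,
         ((pvFStep k (d, false) r).2 || (pvRoundF rs k (pvFStep k (d, false) r).1).2)) := by
  show (r :: rs).foldl (pvFStep k) (d, false) = _
  rw [List.foldl_cons, pv_foldF_flag k rs (pvFStep k (d, false) r)]
  rfl

lemma pv_fstep_desc (N : Nat) (r : Int × Int) (d : List Int) (k : Int)
    (hd : d.length = N) (hk : 0 ≤ k)
    (h1 : PySem.Raise.InRange N r.1) (h2 : PySem.Raise.InRange N r.2) :
    (pvFStep k (d, false) r).1.length = N ∧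
    (∀ c, ((d.getD c 0 = -1 ∧ pvAdj1 N r d k c → (pvFStep k (d, false) r).1.getD c 0 = k + 1)
       ∧ (¬(d.getD c 0 = -1 ∧ pvAdj1 N r d k c) → (pvFStep k (d, false) r).1.getD c 0 = d.getD c 0))) ∧
    ((pvFStep k (d, false) r).2 = true ↔ ∃ c, d.getD c 0 = -1 ∧ pvAdj1 N r d k c) := by
  obtain ⟨c1, hc1⟩ := pv_idx_of_inRange (hd ▸ h1)
  obtain ⟨c2, hc2⟩ := pv_idx_of_inRange (hd ▸ h2)
  have hc1' : PySem.List.pyIdx? N r.1 = some c1 := hd ▸ hc1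
  have hc2' : PySem.List.pyIdx? N r.2 = some c2 := hd ▸ hc2
  have hlt1 : c1 < d.length := hd ▸ pv_idx_lt hc1'
  have hlt2 : c2 < d.length := hd ▸ pv_idx_lt hc2'
  have hg1 : PySem.List.pyGetD d r.1 0 = d.getD c1 0 := pv_getD_cell d r.1 c1 0 hc1
  have hg2 : PySem.List.pyGetD d r.2 0 = d.getD c2 0 := pv_getD_cell d r.2 c2 0 hc2
  have hvcell1 : ∀ c, PySem.List.pyIdx? N r.1 = some c → c = c1 := by
    intro c h; exact (Option.some_inj.mp (hc1'.symm.trans h)).symm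
  have hvcell2 : ∀ c, PySem.List.pyIdx? N r.2 = some c → c = c2 := by
    intro c h; exact (Option.some_inj.mp (hc2'.symm.trans h)).symm
  by_cases hA : PySem.List.pyGetD d r.1 0 = k ∧ PySem.List.pyGetD d r.2 0 = -1
  · -- first branch fires: set cell c2 to k+1
    have hset : PySem.List.pySetD d r.2 (k + 1) = d.set c2 (k + 1) := pv_setD_cell d r.2 c2 _ hc2
    have hgB : PySem.List.pyGetD (PySem.List.pySetD d r.2 (k + 1)) r.2 0 = k + 1 := by
      rw [hset, pv_getD_cell _ r.2 c2 0 (by simpa using hc2), pv_getD_set _ _ _ _ _ hlt2]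
      simp
    have hB : ¬(PySem.List.pyGetD (PySem.List.pySetD d r.2 (k + 1)) r.2 0 = k ∧
        PySem.List.pyGetD (PySem.List.pySetD d r.2 (k + 1)) r.1 0 = -1) := by
      rw [hgB]; intro h; omega
    have hstep : pvFStep k (d, false) r = (d.set c2 (k + 1), true) := by
      unfold pvFStep
      simp only [if_pos hA, hset]
      rw [if_neg (show ¬(PySem.List.pyGetD (d.set c2 (k + 1)) r.2 0 = k ∧
        PySem.List.pyGetD (d.set c2 (k + 1)) r.1 0 = -1) by rw [← hset]; exact hB)]
    rw [hstep]
    refine ⟨by simpa using hd, fun c => ⟨?_, ?_⟩, ?_⟩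
    · rintro ⟨hm1, hadj⟩
      have hcc2 : c = c2 := by
        rcases hadj with ⟨_, hx⟩ | ⟨hv, _⟩
        · exact hvcell2 c hx
        · exfalso
          have hv2 : d.getD c2 0 = k := by rw [← hg2]; exact hv
          have hv3 : d.getD c2 0 = -1 := by rw [← hg2]; exact hA.2
          omega
      rw [pv_getD_set _ _ _ _ _ hlt2, if_pos hcc2]
    · intro hn
      rw [pv_getD_set _ _ _ _ _ hlt2]
      rcases eq_or_ne c c2 with h | h
      · exfalso; subst h
        exact hn ⟨by rw [← hg2]; exact hA.2, Or.inl ⟨hA.1, hc2'⟩⟩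
      · rw [if_neg h]
    · constructor
      · intro _
        exact ⟨c2, by rw [← hg2]; exact hA.2, Or.inl ⟨hA.1, hc2'⟩⟩
      · intro _; rfl
  · by_cases hB : PySem.List.pyGetD d r.2 0 = k ∧ PySem.List.pyGetD d r.1 0 = -1
    · have hset : PySem.List.pySetD d r.1 (k + 1) = d.set c1 (k + 1) := pv_setD_cell d r.1 c1 _ hc1
      have hstep : pvFStep k (d, false) r = (d.set c1 (k + 1), true) := by
        unfold pvFStep
        simp only [if_neg hA, if_pos hB, hset]
      rw [hstep]
      refine ⟨by simpa using hd, fun c => ⟨?_, ?_⟩, ?_⟩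
      · rintro ⟨hm1, hadj⟩
        have hcc1 : c = c1 := by
          rcases hadj with ⟨hv, _⟩ | ⟨_, hx⟩
          · exfalso
            have hv2 : d.getD c1 0 = k := by rw [← hg1]; exact hv
            have hv3 : d.getD c1 0 = -1 := by rw [← hg1]; exact hB.2
            omega
          · exact hvcell1 c hx
        rw [pv_getD_set _ _ _ _ _ hlt1, if_pos hcc1]
      · intro hn
        rw [pv_getD_set _ _ _ _ _ hlt1]
        rcases eq_or_ne c c1 with h | h
        · exfalso; subst h
          exact hn ⟨by rw [← hg1]; exact hB.2, Or.inr ⟨hB.1, hc1'⟩⟩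
        · rw [if_neg h]
      · constructor
        · intro _
          exact ⟨c1, by rw [← hg1]; exact hB.2, Or.inr ⟨hB.1, hc1'⟩⟩
        · intro _; rfl
    · have hnomark : ∀ c, ¬(d.getD c 0 = -1 ∧ pvAdj1 N r d k c) := by
        rintro c ⟨hm1, ⟨hv, hx⟩ | ⟨hv, hx⟩⟩
        · have : c = c2 := hvcell2 c hx
          subst this
          exact hA ⟨hv, by rw [hg2]; exact hm1⟩
        · have : c = c1 := hvcell1 c hx
          subst this
          exact hB ⟨hv, by rw [hg1]; exact hm1⟩
      have hstep : pvFStep k (d, false) r = (d, false) := by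
        unfold pvFStep
        simp only [if_neg hA, if_neg hB]
      rw [hstep]
      refine ⟨hd, fun c => ⟨fun h => absurd h (hnomark c), fun _ => rfl⟩, ?_⟩
      constructor
      · intro h; exact absurd h (by simp)
      · rintro ⟨c, hc⟩; exact absurd hc (hnomark c)

lemma pv_roundF_desc (N : Nat) (roads : List (Int × Int)) (k : Int) (hk : 0 ≤ k) :
    ∀ (d : List Int), d.length = N →
    (∀ r ∈ roads, PySem.Raise.InRange N r.1 ∧ PySem.Raise.InRange N r.2) →
    (pvRoundF roads k d).1.length = N ∧
    (∀ c, ((d.getD c 0 = -1 ∧ pvAdjTo N roads d k c → (pvRoundF roads k d).1.getD c 0 = k + 1)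
       ∧ (¬(d.getD c 0 = -1 ∧ pvAdjTo N roads d k c) → (pvRoundF roads k d).1.getD c 0 = d.getD c 0))) ∧
    ((pvRoundF roads k d).2 = true ↔ ∃ c, d.getD c 0 = -1 ∧ pvAdjTo N roads d k c) := by
  induction roads with
  | nil =>
    intro d hd _
    refine ⟨hd, fun c => ⟨?_, fun _ => rfl⟩, ?_⟩
    · rintro ⟨-, ⟨r, hr, -⟩⟩
      exact absurd hr (List.not_mem_nil)
    · constructor
      · intro h; exact absurd h (by simp [pvRoundF])
      · rintro ⟨c, -, r, hr, -⟩; exact absurd hr (List.not_mem_nil)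
  | cons r rs ih =>
    intro d hd hr
    obtain ⟨hS_len, hS, hSflag⟩ := pv_fstep_desc N r d k hd hk
      (hr r List.mem_cons_self).1 (hr r List.mem_cons_self).2
    have hrs : ∀ x ∈ rs, PySem.Raise.InRange N x.1 ∧ PySem.Raise.InRange N x.2 :=
      fun x hx => hr x (List.mem_cons_of_mem r hx)
    obtain ⟨hI_len, hI, hIflag⟩ := ih (pvFStep k (d, false) r).1 hS_len hrs
    have hval : ∀ c, c < N → ((pvFStep k (d, false) r).1.getD c 0 = k ↔ d.getD c 0 = k) := by
      intro c hc
      by_cases hM : d.getD c 0 = -1 ∧ pvAdj1 N r d k c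
      · rw [(hS c).1 hM]
        constructor <;> intro h <;> [omega; (exact absurd (hM.1.symm.trans h) (by omega))]
      · rw [(hS c).2 hM]
    have hneg : ∀ c, ((pvFStep k (d, false) r).1.getD c 0 = -1
        ↔ (d.getD c 0 = -1 ∧ ¬ pvAdj1 N r d k c)) := by
      intro c
      by_cases hM : d.getD c 0 = -1 ∧ pvAdj1 N r d k c
      · rw [(hS c).1 hM]
        constructor
        · intro h; omega
        · rintro ⟨-, hna⟩; exact absurd hM.2 hna
      · rw [(hS c).2 hM]
        constructor
        · intro h
          refine ⟨h, fun ha => hM ⟨h, ha⟩⟩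
        · rintro ⟨h, -⟩; exact h
    have htr := pv_adjTo_transfer N rs d (pvFStep k (d, false) r).1 k hd hS_len hrs hval
    rw [pv_roundF_cons]
    refine ⟨hI_len, fun c => ⟨?_, ?_⟩, ?_⟩
    · rintro ⟨hm1, hadj⟩
      rcases (pv_adjTo_cons N r rs d k c).mp hadj with h1 | h2
      · have hstep := (hS c).1 ⟨hm1, h1⟩
        refine ((hI c).2 ?_).trans hstep
        rintro ⟨hm1', -⟩
        rw [hstep] at hm1'; omega
      · by_cases hM : d.getD c 0 = -1 ∧ pvAdj1 N r d k c
        · have hstep := (hS c).1 hM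
          refine ((hI c).2 ?_).trans hstep
          rintro ⟨hm1', -⟩
          rw [hstep] at hm1'; omega
        · have hstep := (hS c).2 hM
          exact (hI c).1 ⟨hstep.trans hm1, (htr c).mpr h2⟩
    · intro hn
      have hnM : ¬(d.getD c 0 = -1 ∧ pvAdj1 N r d k c) := by
        rintro ⟨a, b⟩; exact hn ⟨a, (pv_adjTo_cons N r rs d k c).mpr (Or.inl b)⟩
      have hstep := (hS c).2 hnM
      refine ((hI c).2 ?_).trans hstep
      rintro ⟨hm1', hadj'⟩
      rw [hstep] at hm1'
      exact hn ⟨hm1', (pv_adjTo_cons N r rs d k c).mpr (Or.inr ((htr c).mp hadj'))⟩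
    · rw [Bool.or_eq_true, hSflag, hIflag]
      constructor
      · rintro (⟨c, hm1, ha⟩ | ⟨c, hm1, ha⟩)
        · exact ⟨c, hm1, (pv_adjTo_cons N r rs d k c).mpr (Or.inl ha)⟩
        · obtain ⟨hm1d, -⟩ := (hneg c).mp hm1
          exact ⟨c, hm1d, (pv_adjTo_cons N r rs d k c).mpr (Or.inr ((htr c).mp ha))⟩
      · rintro ⟨c, hm1, hadj⟩
        rcases (pv_adjTo_cons N r rs d k c).mp hadj with h1 | h2
        · exact Or.inl ⟨c, hm1, h1⟩
        · by_cases hM : pvAdj1 N r d k c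
          · exact Or.inl ⟨c, hm1, hM⟩
          · exact Or.inr ⟨c, (hneg c).mpr ⟨hm1, hM⟩, (htr c).mpr h2⟩

lemma pv_getD_neg_idx (d : List Int) (v : Int) (h : PySem.List.pyGetD d v 0 = -1) :
    ∃ cv, PySem.List.pyIdx? d.length v = some cv := by
  rcases hk : PySem.List.pyIdx? d.length v with _ | cv
  · exfalso; simp [PySem.List.pyGetD, PySem.List.pyGet?, hk] at h
  · exact ⟨cv, rfl⟩

lemma pv_expC_desc (val : Int) (hval : val ≠ -1) :
    ∀ (cands d : List Int),
      (expC d cands val).1.length = d.length ∧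
      (∀ c, ((d.getD c 0 = -1 ∧ (∃ v ∈ cands, PySem.List.pyIdx? d.length v = some c)) →
                (expC d cands val).1.getD c 0 = val)
          ∧ (¬(d.getD c 0 = -1 ∧ (∃ v ∈ cands, PySem.List.pyIdx? d.length v = some c)) →
                (expC d cands val).1.getD c 0 = d.getD c 0)) ∧
      (∀ c, (∃ u ∈ (expC d cands val).2, PySem.List.pyIdx? d.length u = some c) ↔
              (d.getD c 0 = -1 ∧ ∃ v ∈ cands, PySem.List.pyIdx? d.length v = some c)) ∧
      (∀ u ∈ (expC d cands val).2, u ∈ cands) := by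
  intro cands
  induction cands with
  | nil =>
    intro d
    refine ⟨rfl, fun c => ⟨?_, fun _ => rfl⟩, fun c => ?_, fun u hu => absurd hu List.not_mem_nil⟩
    · rintro ⟨-, v, hv, -⟩; exact absurd hv List.not_mem_nil
    · simp [expC]
  | cons v vs ih =>
    intro d
    rw [pv_expC_cons]
    by_cases ht : PySem.List.pyGetD d v 0 = -1
    · rw [if_pos ht]
      obtain ⟨cv, hcv⟩ := pv_getD_neg_idx d v ht
      have hlt : cv < d.length := pv_idx_lt hcv
      have hdcv : d.getD cv 0 = -1 := by rw [← pv_getD_cell d v cv 0 hcv]; exact ht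
      have hset : PySem.List.pySetD d v val = d.set cv val := pv_setD_cell d v cv val hcv
      have hlen' : (PySem.List.pySetD d v val).length = d.length := by rw [hset]; simp
      obtain ⟨ihlen, ihptw, ihacc, ihsub⟩ := ih (PySem.List.pySetD d v val)
      have hget' : ∀ c, (PySem.List.pySetD d v val).getD c 0
          = if c = cv then val else d.getD c 0 := by
        intro c; rw [hset]; exact pv_getD_set d cv c val 0 hlt
      have hvcell : ∀ c, PySem.List.pyIdx? d.length v = some c → c = cv := by
        intro c h; exact (Option.some_inj.mp (hcv.symm.trans h)).symm
      refine ⟨by rw [ihlen, hlen'], fun c => ⟨?_, ?_⟩, fun c => ?_, fun u hu => ?_⟩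
      · rintro ⟨hm1, hex⟩
        rcases eq_or_ne c cv with hc | hc
        · rw [(ihptw c).2 (by rw [hget', if_pos hc]; rintro ⟨h, -⟩; exact hval h)]
          rw [hget', if_pos hc]
        · obtain ⟨x, hx, hxc⟩ := hex
          rcases List.mem_cons.mp hx with h | h
          · exact absurd (hvcell c (h ▸ hxc)) hc
          · exact (ihptw c).1 ⟨by rw [hget', if_neg hc]; exact hm1,
              ⟨x, h, by rw [hlen']; exact hxc⟩⟩
      · intro hn
        have hccv : c ≠ cv := by
          rintro rfl
          exact hn ⟨hdcv, v, List.mem_cons_self, hcv⟩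
        have h2 : ¬((PySem.List.pySetD d v val).getD c 0 = -1 ∧
            ∃ x ∈ vs, PySem.List.pyIdx? (PySem.List.pySetD d v val).length x = some c) := by
          rintro ⟨hm1', x, hx, hxc⟩
          rw [hget', if_neg hccv] at hm1'
          rw [hlen'] at hxc
          exact hn ⟨hm1', x, List.mem_cons_of_mem v hx, hxc⟩
        rw [(ihptw c).2 h2, hget', if_neg hccv]
      · rcases eq_or_ne c cv with hc | hc
        · constructor
          · intro _; exact ⟨hc ▸ hdcv, v, List.mem_cons_self, hc ▸ hcv⟩
          · intro _; exact ⟨v, List.mem_cons_self, hc ▸ hcv⟩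
        · have hL : (∃ u ∈ v :: (expC (PySem.List.pySetD d v val) vs val).2,
              PySem.List.pyIdx? d.length u = some c)
              ↔ ∃ u ∈ (expC (PySem.List.pySetD d v val) vs val).2,
                PySem.List.pyIdx? d.length u = some c := by
            constructor
            · rintro ⟨u, hu, huc⟩
              rcases List.mem_cons.mp hu with h | h
              · exact absurd (hvcell c (h ▸ huc)) hc
              · exact ⟨u, h, huc⟩
            · rintro ⟨u, hu, huc⟩
              exact ⟨u, List.mem_cons_of_mem v hu, huc⟩
          rw [hL]
          have := ihacc c
          rw [hlen'] at this
          rw [this, hget', if_neg hc]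
          constructor
          · rintro ⟨hm1, x, hx, hxc⟩
            exact ⟨hm1, x, List.mem_cons_of_mem v hx, hxc⟩
          · rintro ⟨hm1, x, hx, hxc⟩
            rcases List.mem_cons.mp hx with h | h
            · exact absurd (hvcell c (h ▸ hxc)) hc
            · exact ⟨hm1, x, h, hxc⟩
      · rcases List.mem_cons.mp hu with h | h
        · exact h ▸ List.mem_cons_self
        · exact List.mem_cons_of_mem v (ihsub u h)
    · rw [if_neg ht]
      obtain ⟨ihlen, ihptw, ihacc, ihsub⟩ := ih d
      have hnov : ∀ c, d.getD c 0 = -1 → ¬ PySem.List.pyIdx? d.length v = some c := by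
        intro c hm1 hvc
        exact ht (by rw [pv_getD_cell d v c 0 hvc]; exact hm1)
      have hcond : ∀ c, (d.getD c 0 = -1 ∧ (∃ x ∈ v :: vs, PySem.List.pyIdx? d.length x = some c))
          ↔ (d.getD c 0 = -1 ∧ (∃ x ∈ vs, PySem.List.pyIdx? d.length x = some c)) := by
        intro c
        constructor
        · rintro ⟨hm1, x, hx, hxc⟩
          rcases List.mem_cons.mp hx with h | h
          · exact absurd (h ▸ hxc) (hnov c hm1)
          · exact ⟨hm1, x, h, hxc⟩
        · rintro ⟨hm1, x, hx, hxc⟩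
          exact ⟨hm1, x, List.mem_cons_of_mem v hx, hxc⟩
      refine ⟨ihlen, fun c => ⟨?_, ?_⟩, fun c => ?_, fun u hu => List.mem_cons_of_mem v (ihsub u hu)⟩
      · intro h; exact (ihptw c).1 ((hcond c).mp h)
      · intro h; exact (ihptw c).2 (fun h2 => h ((hcond c).mpr h2))
      · rw [ihacc c, hcond c]


def pvMemRow (N : Nat) (roads : List (Int × Int)) (c : Nat) (v : Int) : Prop :=
  ∃ r ∈ roads, (PySem.List.pyIdx? N r.1 = some c ∧ v = r.2) ∨
               (PySem.List.pyIdx? N r.2 = some c ∧ v = r.1)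

lemma pv_memRow_cons (N : Nat) (r : Int × Int) (rs : List (Int × Int)) (c : Nat) (v : Int) :
    pvMemRow N (r :: rs) c v ↔
      ((PySem.List.pyIdx? N r.1 = some c ∧ v = r.2) ∨
       (PySem.List.pyIdx? N r.2 = some c ∧ v = r.1)) ∨ pvMemRow N rs c v := by
  simp [pvMemRow, List.mem_cons, or_and_right, exists_or]

lemma pv_bstep_desc (N : Nat) (r : Int × Int) (g : List (List Int))
    (hg : g.length = N)
    (h1 : PySem.Raise.InRange N r.1) (h2 : PySem.Raise.InRange N r.2) :
    (PySem.List.pySetD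
        (PySem.List.pySetD g r.1 (PySem.List.pyGetD g r.1 [] ++ [r.2]))
        r.2 (PySem.List.pyGetD (PySem.List.pySetD g r.1 (PySem.List.pyGetD g r.1 [] ++ [r.2])) r.2 [] ++ [r.1])).length = N ∧
    ∀ c v, (v ∈ (PySem.List.pySetD
        (PySem.List.pySetD g r.1 (PySem.List.pyGetD g r.1 [] ++ [r.2]))
        r.2 (PySem.List.pyGetD (PySem.List.pySetD g r.1 (PySem.List.pyGetD g r.1 [] ++ [r.2])) r.2 [] ++ [r.1])).getD c []
      ↔ v ∈ g.getD c [] ∨ ((PySem.List.pyIdx? N r.1 = some c ∧ v = r.2) ∨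
                           (PySem.List.pyIdx? N r.2 = some c ∧ v = r.1))) := by
  obtain ⟨c1, hc1⟩ := pv_idx_of_inRange h1
  obtain ⟨c2, hc2⟩ := pv_idx_of_inRange h2
  have hlt1 : c1 < g.length := hg ▸ pv_idx_lt hc1
  have hlt2 : c2 < g.length := hg ▸ pv_idx_lt hc2
  have hs1 : PySem.List.pySetD g r.1 (PySem.List.pyGetD g r.1 [] ++ [r.2])
      = g.set c1 (g.getD c1 [] ++ [r.2]) := by
    rw [pv_setD_cell g r.1 c1 _ (hg ▸ hc1), pv_getD_cell g r.1 c1 [] (hg ▸ hc1)]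
  set g1 := g.set c1 (g.getD c1 [] ++ [r.2]) with hg1def
  have hg1len : g1.length = N := by rw [hg1def]; simp [hg]
  have hg1get : ∀ c, g1.getD c [] = if c = c1 then g.getD c1 [] ++ [r.2] else g.getD c [] := by
    intro c; rw [hg1def]; exact pv_getD_set g c1 c _ [] hlt1
  have hs2 : PySem.List.pySetD g1 r.2 (PySem.List.pyGetD g1 r.2 [] ++ [r.1])
      = g1.set c2 (g1.getD c2 [] ++ [r.1]) := by
    rw [pv_setD_cell g1 r.2 c2 _ (hg1len ▸ hc2), pv_getD_cell g1 r.2 c2 [] (hg1len ▸ hc2)]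
  have hg2get : ∀ c, (g1.set c2 (g1.getD c2 [] ++ [r.1])).getD c []
      = if c = c2 then g1.getD c2 [] ++ [r.1] else g1.getD c [] := by
    intro c; exact pv_getD_set g1 c2 c _ [] (by rw [hg1len]; exact pv_idx_lt hc2)
  rw [hs1, hs2]
  constructor
  · simp [hg1len]
  · intro c v
    rw [hg2get, hg1get]
    have e1 : ∀ cc, PySem.List.pyIdx? N r.1 = some cc ↔ cc = c1 := by
      intro cc
      constructor
      · intro h; exact (Option.some_inj.mp (hc1.symm.trans h)).symm
      · rintro rfl; exact hc1
    have e2 : ∀ cc, PySem.List.pyIdx? N r.2 = some cc ↔ cc = c2 := by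
      intro cc
      constructor
      · intro h; exact (Option.some_inj.mp (hc2.symm.trans h)).symm
      · rintro rfl; exact hc2
    rcases eq_or_ne c2 c1 with h21 | h21 <;>
      rcases eq_or_ne c c2 with h2c | h2c <;> rcases eq_or_ne c c1 with h1c | h1c <;>
      simp [h2c, h1c, h21, hg1get, e1, e2, List.mem_append, - List.getD_eq_getElem?_getD] <;>
      first | tauto | (split_ifs with hif <;> simp_all [List.mem_append])

lemma pv_build_desc (N : Nat) :
    ∀ (rs : List (Int × Int)) (g : List (List Int)), g.length = N →
    (∀ r ∈ rs, PySem.Raise.InRange N r.1 ∧ PySem.Raise.InRange N r.2) →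
    (rs.foldl (fun g road =>
      let g1 := PySem.List.pySetD g road.1 (PySem.List.pyGetD g road.1 [] ++ [road.2])
      PySem.List.pySetD g1 road.2 (PySem.List.pyGetD g1 road.2 [] ++ [road.1])) g).length = N ∧
    ∀ c v, (v ∈ (rs.foldl (fun g road =>
      let g1 := PySem.List.pySetD g road.1 (PySem.List.pyGetD g road.1 [] ++ [road.2])
      PySem.List.pySetD g1 road.2 (PySem.List.pyGetD g1 road.2 [] ++ [road.1])) g).getD c []
      ↔ v ∈ g.getD c [] ∨ pvMemRow N rs c v) := by
  intro rs
  induction rs with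
  | nil =>
    intro g hg _
    refine ⟨hg, fun c v => ?_⟩
    simp [pvMemRow]
  | cons r rs ih =>
    intro g hg hr
    obtain ⟨hslen, hsmem⟩ := pv_bstep_desc N r g hg (hr r List.mem_cons_self).1 (hr r List.mem_cons_self).2
    simp only [List.foldl_cons]
    obtain ⟨hflen, hfmem⟩ := ih _ hslen (fun x hx => hr x (List.mem_cons_of_mem r hx))
    refine ⟨hflen, fun c v => ?_⟩
    rw [hfmem c v, hsmem c v, pv_memRow_cons]
    tauto

-- ===== (III) gluing BFS levels to relaxation rounds =====
lemma pv_bfB_eq (roads : List (Int × Int)) (d : List Int) (k : Nat) :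
    bfB roads d k = if (pvRoundF roads (k : Int) d).2
      then bfB roads (pvRoundF roads (k : Int) d).1 (k + 1)
      else (pvRoundF roads (k : Int) d).1 := by
  rw [bfB]
  rfl

lemma pv_no_neg_one (d : List Int) (h : d.count (-1) = 0) : ∀ c, d.getD c 0 ≠ -1 := by
  intro c
  by_cases hc : c < d.length
  · intro hv
    have hmem := pv_getD_mem d c hc
    rw [hv] at hmem
    rw [← List.count_pos_iff] at hmem
    omega
  · rw [List.getD_eq_default _ _ (by omega)]
    omega

lemma pv_sim (roads : List (Int × Int)) (N : Nat)
    (hroads : ∀ r ∈ roads, PySem.Raise.InRange N r.1 ∧ PySem.Raise.InRange N r.2)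
    (g : List (List Int)) (hg : g.length = N)
    (hrow : ∀ c v, v ∈ g.getD c [] ↔ pvMemRow N roads c v) :
    ∀ (m k : Nat) (d f : List Int),
      d.count (-1) ≤ m →
      d.length = N →
      f ≠ [] →
      (∀ u ∈ f, PySem.Raise.InRange N u) →
      (∀ c, c < N → (d.getD c 0 = (k : Int) ↔ ∃ u ∈ f, PySem.List.pyIdx? N u = some c)) →
      (∀ c, c < N → d.getD c 0 = -1 ∨ (0 ≤ d.getD c 0 ∧ d.getD c 0 ≤ (k : Int))) →
      bfsLevel g d f k = bfB roads d k := by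
  intro m
  induction m with
  | zero =>
    intro k d f hm hd hfne hf h1 h2
    match f with
    | [] => exact absurd rfl hfne
    | u0 :: fr =>
      rw [bfsLevel.eq_2, pv_nest_eq_expC, pv_bfB_eq]
      set cands := (u0 :: fr).flatMap (fun u => PySem.List.pyGetD g u []) with hcands
      set val : Int := ((k + 1 : Nat) : Int) with hvaldef
      have hvalk : val = (k : Int) + 1 := by rw [hvaldef]; push_cast; ring
      have hno1 : ∀ c, d.getD c 0 ≠ -1 := pv_no_neg_one d (by omega)
      obtain ⟨Elen, Eptw, Eacc, Esub⟩ := pv_expC_desc val (by rw [hvalk]; omega) cands d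
      have hcount := pv_expC_count d cands val (by rw [hvalk]; omega)
      have hE2nil : (expC d cands val).2 = [] := by
        have : (expC d cands val).2.length = 0 := by omega
        exact List.length_eq_zero_iff.mp this
      have hE1d : (expC d cands val).1 = d := by
        apply pv_ext_getD _ _ Elen
        intro c
        exact (Eptw c).2 (fun hM => hno1 c hM.1)
      obtain ⟨Rlen, Rptw, Rflag⟩ := pv_roundF_desc N roads (k : Int) (by omega) d hd hroads
      have hfl : (pvRoundF roads (k : Int) d).2 = false := by
        rw [← Bool.not_eq_true, Rflag]
        rintro ⟨c, hm1, -⟩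
        exact hno1 c hm1
      have hR1d : (pvRoundF roads (k : Int) d).1 = d := by
        apply pv_ext_getD _ _ (Rlen.trans hd.symm)
        intro c
        exact (Rptw c).2 (fun hM => hno1 c hM.1)
      rw [hE2nil, hE1d, bfsLevel.eq_1, hfl]
      simp [hR1d]
  | succ m ih =>
    intro k d f hm hd hfne hf h1 h2
    match f with
    | [] => exact absurd rfl hfne
    | u0 :: fr =>
      rw [bfsLevel.eq_2, pv_nest_eq_expC, pv_bfB_eq]
      set cands := (u0 :: fr).flatMap (fun u => PySem.List.pyGetD g u []) with hcands
      set val : Int := ((k + 1 : Nat) : Int) with hvaldef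
      have hvalk : val = (k : Int) + 1 := by rw [hvaldef]; push_cast; ring
      obtain ⟨Elen, Eptw, Eacc, Esub⟩ := pv_expC_desc val (by rw [hvalk]; omega) cands d
      have hElen : (expC d cands val).1.length = N := Elen.trans hd
      have hcount := pv_expC_count d cands val (by rw [hvalk]; omega)
      have hcand_range : ∀ v ∈ cands, PySem.Raise.InRange N v := by
        intro v hv
        rw [hcands] at hv
        obtain ⟨u, hu, hvu⟩ := List.mem_flatMap.mp hv
        obtain ⟨cu, hcu⟩ := pv_idx_of_inRange (hf u hu)
        rw [pv_getD_cell g u cu [] (hg ▸ hcu)] at hvu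
        obtain ⟨r, hr, hcase⟩ := (hrow cu v).mp hvu
        rcases hcase with ⟨-, hveq⟩ | ⟨-, hveq⟩
        · exact hveq ▸ (hroads r hr).2
        · exact hveq ▸ (hroads r hr).1
      have hcond : ∀ c, c < N →
          ((∃ v ∈ cands, PySem.List.pyIdx? N v = some c) ↔ pvAdjTo N roads d (k : Int) c) := by
        intro c hc
        constructor
        · rintro ⟨v, hv, hvc⟩
          rw [hcands] at hv
          obtain ⟨u, hu, hvu⟩ := List.mem_flatMap.mp hv
          obtain ⟨cu, hcu⟩ := pv_idx_of_inRange (hf u hu)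
          rw [pv_getD_cell g u cu [] (hg ▸ hcu)] at hvu
          obtain ⟨r, hr, hcase⟩ := (hrow cu v).mp hvu
          have hcuk : d.getD cu 0 = (k : Int) := (h1 cu (pv_idx_lt hcu)).mpr ⟨u, hu, hcu⟩
          rcases hcase with ⟨hr1, hveq⟩ | ⟨hr2, hveq⟩
          · refine ⟨r, hr, Or.inl ⟨?_, hveq ▸ hvc⟩⟩
            rw [pv_getD_cell d r.1 cu 0 (hd ▸ hr1)]
            exact hcuk
          · refine ⟨r, hr, Or.inr ⟨?_, hveq ▸ hvc⟩⟩
            rw [pv_getD_cell d r.2 cu 0 (hd ▸ hr2)]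
            exact hcuk
        · rintro ⟨r, hr, ⟨hval1, hx⟩ | ⟨hval2, hx⟩⟩
          · obtain ⟨c1, hc1⟩ := pv_idx_of_inRange (hroads r hr).1
            rw [pv_getD_cell d r.1 c1 0 (hd ▸ hc1)] at hval1
            obtain ⟨u, hu, hcu⟩ := (h1 c1 (pv_idx_lt hc1)).mp hval1
            refine ⟨r.2, ?_, hx⟩
            rw [hcands]
            refine List.mem_flatMap.mpr ⟨u, hu, ?_⟩
            rw [pv_getD_cell g u c1 [] (hg ▸ hcu)]
            exact (hrow c1 r.2).mpr ⟨r, hr, Or.inl ⟨hc1, rfl⟩⟩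
          · obtain ⟨c2, hc2⟩ := pv_idx_of_inRange (hroads r hr).2
            rw [pv_getD_cell d r.2 c2 0 (hd ▸ hc2)] at hval2
            obtain ⟨u, hu, hcu⟩ := (h1 c2 (pv_idx_lt hc2)).mp hval2
            refine ⟨r.1, ?_, hx⟩
            rw [hcands]
            refine List.mem_flatMap.mpr ⟨u, hu, ?_⟩
            rw [pv_getD_cell g u c2 [] (hg ▸ hcu)]
            exact (hrow c2 r.1).mpr ⟨r, hr, Or.inr ⟨hc2, rfl⟩⟩
      obtain ⟨Rlen, Rptw, Rflag⟩ := pv_roundF_desc N roads (k : Int) (by omega) d hd hroads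
      have hE1 : (expC d cands val).1 = (pvRoundF roads (k : Int) d).1 := by
        apply pv_ext_getD _ _ (by rw [hElen, Rlen])
        intro c
        by_cases hc : c < N
        · by_cases hM : d.getD c 0 = -1 ∧ ∃ v ∈ cands, PySem.List.pyIdx? d.length v = some c
          · rw [(Eptw c).1 hM, (Rptw c).1 ⟨hM.1, (hcond c hc).mp (by rw [← hd]; exact hM.2)⟩, hvalk]
          · rw [(Eptw c).2 hM, (Rptw c).2 (fun hM2 => hM ⟨hM2.1, by rw [hd]; exact (hcond c hc).mpr hM2.2⟩)]
        · have hnE : ¬(d.getD c 0 = -1 ∧ ∃ v ∈ cands, PySem.List.pyIdx? d.length v = some c) := by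
            rintro ⟨-, v, -, hvc⟩
            exact hc (hd ▸ pv_idx_lt hvc)
          have hnR : ¬(d.getD c 0 = -1 ∧ pvAdjTo N roads d (k : Int) c) := by
            rintro ⟨-, r, -, ⟨-, hx⟩ | ⟨-, hx⟩⟩ <;> exact hc (pv_idx_lt hx)
          rw [(Eptw c).2 hnE, (Rptw c).2 hnR]
      have hflagiff : (pvRoundF roads (k : Int) d).2 = true ↔ (expC d cands val).2 ≠ [] := by
        rw [Rflag]
        constructor
        · rintro ⟨c, hm1, hadj⟩
          have hc : c < N := by
            obtain ⟨r, -, ⟨-, hx⟩ | ⟨-, hx⟩⟩ := hadj <;> exact pv_idx_lt hx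
          have hex : ∃ v ∈ cands, PySem.List.pyIdx? N v = some c := (hcond c hc).mpr hadj
          have hmem := (Eacc c).mpr ⟨hm1, by rw [hd]; exact hex⟩
          obtain ⟨u, hu, -⟩ := hmem
          intro hnil
          rw [hnil] at hu
          exact absurd hu List.not_mem_nil
        · intro hne
          rcases hE2 : (expC d cands val).2 with _ | ⟨x, xs⟩
          · exact absurd hE2 hne
          · have hx : x ∈ (expC d cands val).2 := by rw [hE2]; exact List.mem_cons_self
            obtain ⟨cx, hcx⟩ := pv_idx_of_inRange (hcand_range x (Esub x hx))
            obtain ⟨hm1, hex⟩ := (Eacc cx).mp ⟨x, hx, by rw [hd]; exact hcx⟩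
            refine ⟨cx, hm1, (hcond cx (pv_idx_lt hcx)).mp (by rw [← hd]; exact hex)⟩
      by_cases hE2c : (expC d cands val).2 = []
      · have hfl : (pvRoundF roads (k : Int) d).2 = false := by
          rw [← Bool.not_eq_true, hflagiff]
          intro hne
          exact hne hE2c
        rw [hE2c, bfsLevel.eq_1, hfl]
        simp [← hE1]
      · rw [if_pos (hflagiff.mpr hE2c), ← hE1]
        apply ih (k + 1) (expC d cands val).1 (expC d cands val).2
        · have hlen1 : 0 < (expC d cands val).2.length := List.length_pos_iff.mpr hE2c
          omega
        · exact hElen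
        · exact hE2c
        · intro u hu; exact hcand_range u (Esub u hu)
        · intro c hc
          have hacc := Eacc c
          rw [hd] at hacc
          rw [hacc]
          constructor
          · intro hv
            by_cases hM : d.getD c 0 = -1 ∧ ∃ v ∈ cands, PySem.List.pyIdx? N v = some c
            · exact hM
            · exfalso
              rw [(Eptw c).2 (by rw [hd]; exact hM)] at hv
              rcases h2 c hc with h | h
              · push_cast at hv; omega
              · push_cast at hv; omega
          · intro hM
            rw [(Eptw c).1 (by rw [hd]; exact hM), hvalk]
            push_cast
            ring
        · intro c hc
          by_cases hM : d.getD c 0 = -1 ∧ ∃ v ∈ cands, PySem.List.pyIdx? d.length v = some c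
          · rw [(Eptw c).1 hM, hvalk]
            refine Or.inr ⟨by omega, by push_cast; omega⟩
          · rw [(Eptw c).2 hM]
            rcases h2 c hc with h | h
            · left; exact h
            · right
              constructor
              · exact h.1
              · push_cast; omega

-- ===== VERDICT (by name: the statement is the Claim_ definition above) =====
theorem solution_spec : Claim_equal_solution := by
  unfold Claim_equal_solution Spec_solution
  intro n roads sources destination hdom hpre
  obtain ⟨hdest, hroads, hsrc⟩ := hpre
  simp only [solution, solution_alt]
  set N := (n + 1).toNat with hNdef
  -- adjacency-list characterisation
  obtain ⟨hglen, hgrow⟩ := pv_build_desc N roads (List.replicate N []) (by simp) hroads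
  have hrepnil : ∀ c, (List.replicate N ([] : List Int)).getD c [] = [] := by
    intro c
    rcases lt_or_ge c N with h | h
    · simp [List.getD, h]
    · rw [List.getD_eq_default _ _ (by simpa using h)]
  have hgrow' : ∀ c v, v ∈ (roads.foldl (fun g road =>
      let g1 := PySem.List.pySetD g road.1 (PySem.List.pyGetD g road.1 [] ++ [road.2])
      PySem.List.pySetD g1 road.2 (PySem.List.pyGetD g1 road.2 [] ++ [road.1]))
      (List.replicate N ([] : List Int))).getD c [] ↔ pvMemRow N roads c v := by
    intro c v
    rw [hgrow c v, hrepnil]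
    simp
  -- A's deque BFS = level BFS (lemmas of part (I))
  have hkey : ∀ G : List (List Int),
      bfsA G (List.replicate N (-1 : Int)) [(destination, (0 : Nat))]
        = bfsLevel G (PySem.List.pySetD (List.replicate N (-1 : Int)) destination 0)
            [destination] 0 := by
    intro G
    have h1 := pv_L1 G (List.replicate N (-1 : Int)) [destination] [] 0
    simp only [List.map_cons, List.map_nil, List.append_nil] at h1
    have h2 := pv_L2 G ((List.replicate N (-1 : Int)).count (-1))
      (List.replicate N (-1 : Int)) [destination] 0 le_rfl
    have h3 : expC (List.replicate N (-1 : Int)) [destination] ((0 : Nat) : Int)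
        = (PySem.List.pySetD (List.replicate N (-1 : Int)) destination ((0 : Nat) : Int),
            [destination]) := by
      rw [pv_expC_cons, if_pos (pv_init_unvisited _ _ hdest)]
      rfl
    rw [← h1, h2, h3] at *
    norm_num
  -- initial invariants for pv_sim at level 0
  obtain ⟨cd, hcd⟩ := pv_idx_of_inRange hdest
  have hcdlt : cd < N := pv_idx_lt hcd
  have hreplen : (List.replicate N (-1 : Int)).length = N := by simp
  have hrepget : ∀ c, c < N → (List.replicate N (-1 : Int)).getD c 0 = -1 := by
    intro c hc
    simp [List.getD, hc]
  have hset0 : PySem.List.pySetD (List.replicate N (-1 : Int)) destination 0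
      = (List.replicate N (-1 : Int)).set cd 0 :=
    pv_setD_cell _ destination cd 0 (by rw [hreplen]; exact hcd)
  have hd0len : (PySem.List.pySetD (List.replicate N (-1 : Int)) destination 0).length = N := by
    rw [hset0]; simp
  have hd0get : ∀ c, (PySem.List.pySetD (List.replicate N (-1 : Int)) destination 0).getD c 0
      = if c = cd then 0 else (List.replicate N (-1 : Int)).getD c 0 := by
    intro c
    rw [hset0]
    exact pv_getD_set _ cd c 0 0 (by rw [hreplen]; exact hcdlt)
  have hsim := pv_sim roads N hroads _ hglen hgrow'
    ((PySem.List.pySetD (List.replicate N (-1 : Int)) destination 0).count (-1)) 0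
    (PySem.List.pySetD (List.replicate N (-1 : Int)) destination 0) [destination]
    le_rfl hd0len (by simp)
    (by intro u hu; rcases List.mem_singleton.mp hu with rfl; exact hdest)
    (by
      intro c hc
      rw [hd0get c]
      rcases eq_or_ne c cd with h | h
      · rw [if_pos h]
        have hsc : PySem.List.pyIdx? N destination = some c := by rw [h]; exact hcd
        constructor
        · intro _; exact ⟨destination, List.mem_singleton.mpr rfl, hsc⟩
        · intro _; norm_num
      · rw [if_neg h, hrepget c hc]
        constructor
        · intro hv; exact absurd hv (by norm_num)
        · rintro ⟨u, hu, hcu⟩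
          rcases List.mem_singleton.mp hu with rfl
          exact absurd (Option.some_inj.mp (hcd.symm.trans hcu)).symm h)
    (by
      intro c hc
      rw [hd0get c]
      rcases eq_or_ne c cd with h | h
      · rw [if_pos h]; right; norm_num
      · rw [if_neg h, hrepget c hc]; left; rfl)
  rw [hkey, hsim]
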